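-- pv_equiv track=rewrite | github.com/nicasop/MachineLearning | prueba1_AlexisVillavicencio.py | recuperarPalabras
-- ===== SOURCE A (Python) =====
-- def recuperarPalabras(codificacion,dicCodi,dic):
--     palabrasC=[]
--     for num in codificacion:
--         posPalabras = []
--         for i in range(len(dicCodi)):
--             if num == dicCodi[i]:
--                 posPalabras.append(i)
--         palabras = []
--         for pos in posPalabras:
--             palabras.append(dic[pos])
--         palabrasC.append(palabras)
--     return palabrasC
-- ===== SOURCE B (Python) =====
-- def recuperarPalabras(codificacion, dicCodi, dic):
--     grouped = {}
--     for code, word in zip(dicCodi, dic):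
--         grouped.setdefault(code, []).append(word)
--     return [list(grouped.get(num, [])) for num in codificacion]
-- ===== Notes on version B (the rewrite author's own statement) =====
-- stated objective: faster
-- what changed: Replaces A's full scan of dicCodi per code (nested loops) by one grouping pass over zip(dicCodi, dic) building a dict code -> words, so each code in codificacion is answered by a single dict lookup.
import Mathlib
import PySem

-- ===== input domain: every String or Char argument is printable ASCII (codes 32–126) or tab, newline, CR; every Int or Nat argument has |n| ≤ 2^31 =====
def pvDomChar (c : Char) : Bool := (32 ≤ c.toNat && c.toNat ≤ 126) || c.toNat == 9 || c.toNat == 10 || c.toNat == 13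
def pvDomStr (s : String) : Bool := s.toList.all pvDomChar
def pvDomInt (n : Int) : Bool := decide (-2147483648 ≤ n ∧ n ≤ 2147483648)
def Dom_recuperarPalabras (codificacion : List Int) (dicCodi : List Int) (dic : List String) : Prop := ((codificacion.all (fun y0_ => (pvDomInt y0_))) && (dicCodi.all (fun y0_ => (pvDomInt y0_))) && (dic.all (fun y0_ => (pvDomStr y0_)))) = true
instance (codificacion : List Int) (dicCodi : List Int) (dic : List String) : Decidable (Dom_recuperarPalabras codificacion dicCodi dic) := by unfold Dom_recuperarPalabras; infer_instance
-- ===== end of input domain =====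

-- B replaces A's per-code full scan of dicCodi by one grouping pass (dict code -> words) and a lookup per code.

-- ===== PORT A =====
-- literal transliteration: for each num, scan range(len(dicCodi)) collecting matching
-- positions, then index dic at each position (dic[pos] raises IndexError when
-- pos ≥ len(dic): Pre_ excludes exactly those inputs; pyGetD's default is never used inside Pre_).
def recuperarPalabras (codificacion : List Int) (dicCodi : List Int) (dic : List String) : List (List String) :=
  codificacion.foldl (fun palabrasC num =>
    let posPalabras : List Int :=
      (PySem.List.pyRange 0 (dicCodi.length : Int) 1).foldl
        (fun ps i => if num = PySem.List.pyGetD dicCodi i 0 then ps ++ [i] else ps) []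
    let palabras : List String :=
      posPalabras.foldl (fun ws pos => ws ++ [PySem.List.pyGetD dic pos ""]) []
    palabrasC ++ [palabras]) []

-- ===== PORT B =====
-- grouped.setdefault(code, []).append(word)  ≡  insert code (getD code [] ++ [word])
def recuperarPalabras_alt (codificacion : List Int) (dicCodi : List Int) (dic : List String) : List (List String) :=
  let grouped : PySem.Dict Int (List String) :=
    (dicCodi.zip dic).foldl (fun d p => d.insert p.1 (d.getD p.1 [] ++ [p.2])) PySem.Dict.empty
  codificacion.map (fun num => grouped.getD num [])

-- ===== PRECONDITION & SPEC =====
-- A raises IndexError exactly when some code of codificacion occurs in dicCodi at a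
-- position ≥ len(dic); Pre_ excludes exactly those inputs (A returns everywhere else).
def Pre_recuperarPalabras (codificacion : List Int) (dicCodi : List Int) (dic : List String) : Prop :=
  ∀ c ∈ dicCodi.drop dic.length, c ∉ codificacion
instance (codificacion : List Int) (dicCodi : List Int) (dic : List String) : Decidable (Pre_recuperarPalabras codificacion dicCodi dic) := by unfold Pre_recuperarPalabras; infer_instance

def pvWitness_recuperarPalabras : List Int × List Int × List String := ([2, 1, 5], [1, 2, 2], ["uno", "dos", "tres"])

def Spec_recuperarPalabras (codificacion : List Int) (dicCodi : List Int) (dic : List String) (out : List (List String)) : Prop := out = recuperarPalabras_alt codificacion dicCodi dic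
instance (codificacion : List Int) (dicCodi : List Int) (dic : List String) (out : List (List String)) : Decidable (Spec_recuperarPalabras codificacion dicCodi dic out) := by unfold Spec_recuperarPalabras; infer_instance

-- ===== CLAIM (what is proved, stated in full; the proofs are below) =====
def Claim_equal_recuperarPalabras : Prop := ∀ (codificacion : List Int) (dicCodi : List Int) (dic : List String), Dom_recuperarPalabras codificacion dicCodi dic → Pre_recuperarPalabras codificacion dicCodi dic → Spec_recuperarPalabras codificacion dicCodi dic (recuperarPalabras codificacion dicCodi dic)

-- ===== LEMMAS AND PROOFS =====

-- B's grouping dict, looked up at num, yields the matching words in order.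
lemma getD_group (pairs : List (Int × String)) (d : PySem.Dict Int (List String)) (num : Int) :
    (pairs.foldl (fun d p => d.insert p.1 (d.getD p.1 [] ++ [p.2])) d).getD num []
      = d.getD num [] ++ ((pairs.filter (fun p => decide (p.1 = num))).map Prod.snd) := by
  induction pairs generalizing d with
  | nil => simp
  | cons p rest ih =>
    simp only [List.foldl_cons, ih, List.filter_cons]
    by_cases hc : p.1 = num
    · subst hc; simp [PySem.Dict.getD_insert_self]
    · rw [PySem.Dict.getD_insert, if_neg (fun e => hc e.symm)]
      simp [hc]

lemma core (dc : List Int) (dw : List String) (num : Int)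
    (h : ∀ i, dw.length ≤ i → i < dc.length → dc.getD i 0 ≠ num) :
    ((List.range dc.length).filter (fun k => decide (num = dc.getD k 0))).map (fun k => dw.getD k "")
      = ((dc.zip dw).filter (fun p => decide (p.1 = num))).map Prod.snd := by
  induction dc generalizing dw with
  | nil => simp
  | cons c dc' ih =>
    cases dw with
    | nil =>
      simp only [List.zip_nil_right, List.filter_nil, List.map_nil, List.map_eq_nil_iff,
        List.filter_eq_nil_iff]
      intro k hk
      have hk' := List.mem_range.mp hk
      have h2 := h k (by simp) hk'
      simp only [List.getD_eq_getElem?_getD] at h2 ⊢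
      simpa using fun e => h2 e.symm
    | cons w dw' =>
      have hrange : List.range ((c :: dc').length) = 0 :: (List.range dc'.length).map Nat.succ := by
        simp [List.range_succ_eq_map]
      have ih' := ih dw' (fun i hi hlt => h (i + 1) (by simpa using hi) (by simpa using hlt))
      rw [hrange]
      simp only [List.filter_cons, List.filter_map, List.zip_cons_cons, List.getD_cons_zero]
      by_cases hc : c = num
      · rw [if_pos (by simp [hc]), if_pos (by simp [hc])]
        simp only [List.map_cons, List.map_map, Function.comp_def, List.getD_cons_succ,
          List.getD_cons_zero, ih']
      · rw [if_neg (by simp; exact fun e => hc e.symm), if_neg (by simp [hc])]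
        simp only [List.map_map, Function.comp_def, List.getD_cons_succ, ih']

-- A's inner scan equals the zip filter when num has no match beyond dic (proved above as `core`).

-- ===== VERDICT (by name: the statement is the Claim_ definition above) =====
theorem recuperarPalabras_spec : Claim_equal_recuperarPalabras := by
  intro codificacion dicCodi dic _ hpre
  unfold Spec_recuperarPalabras recuperarPalabras recuperarPalabras_alt
  simp only [PySem.List.foldl_append_singleton_eq_map, List.nil_append]
  apply List.map_congr_left
  intro num hnum
  -- A's inner loops -> filter/map over the index range
  rw [PySem.List.foldl_append_ite_eq_filter]
  simp only [List.nil_append, PySem.List.pyRange_one, Int.sub_zero, Int.toNat_natCast,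
    List.filter_map, List.map_map]
  -- B's dict lookup -> filter/map over the zip
  rw [getD_group]
  simp only [PySem.Dict.getD_empty, List.nil_append]
  -- Pre_ gives: num never matches at a position beyond dic
  have hh : ∀ i, dic.length ≤ i → i < dicCodi.length → dicCodi.getD i 0 ≠ num := by
    intro i hge hlt heq
    have hidx : i - dic.length < (dicCodi.drop dic.length).length := by
      simp [List.length_drop]; omega
    have hdrop : (dicCodi.drop dic.length)[i - dic.length] = dicCodi[i] := by
      rw [List.getElem_drop]; congr 1; omega
    have hget : dicCodi.getD i 0 = dicCodi[i] := List.getD_eq_getElem _ _ hlt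
    exact hpre _ (hget ▸ hdrop ▸ List.getElem_mem hidx) (heq ▸ hnum)
  rw [← core dicCodi dic num hh]
  simp [Function.comp_def, PySem.List.pyGetD_natCast]
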